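-- pv_equiv track=rewrite | github.com/Erincutku007/RTL-Division-Implementations | src/SRT_division.py | redundant_to_standart_binary
-- ===== SOURCE A (Python) =====
-- def redundant_to_standart_binary(number):
--     res_reversed = reversed(number) #this is needed because enumerate starts indexing the list from the
--     result = 0
--     for i in enumerate(res_reversed):#This step transforms the results from redundant radix 2 base
--     #to binary radix 2 base.
--     #example conversion:
--     #-1 1 1 = (-1)*4 + 1*2 + 1*1 = -1. Pay attention to the powers of two.
--         power,val = i
--         power = 2**power
--         result += val*power
--     return result
-- ===== SOURCE B (Python) =====
-- def redundant_to_standart_binary(number):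
--     # Forward Horner scan with an explicit index: result = 2*result + digit.
--     # No reversal and no 2**power exponentiation.
--     result = 0
--     i = 0
--     n = len(number)
--     while i < n:
--         result = 2 * result + number[i]
--         i += 1
--     return result
-- ===== Notes on version B (the rewrite author's own statement) =====
-- stated objective: faster
-- what changed: Replaced the reversed-enumerate loop with per-step 2**power big-integer exponentiation by a forward index-driven Horner scan (result = 2*result + digit), removing the reversal and the exponentiation.
import Mathlib
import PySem

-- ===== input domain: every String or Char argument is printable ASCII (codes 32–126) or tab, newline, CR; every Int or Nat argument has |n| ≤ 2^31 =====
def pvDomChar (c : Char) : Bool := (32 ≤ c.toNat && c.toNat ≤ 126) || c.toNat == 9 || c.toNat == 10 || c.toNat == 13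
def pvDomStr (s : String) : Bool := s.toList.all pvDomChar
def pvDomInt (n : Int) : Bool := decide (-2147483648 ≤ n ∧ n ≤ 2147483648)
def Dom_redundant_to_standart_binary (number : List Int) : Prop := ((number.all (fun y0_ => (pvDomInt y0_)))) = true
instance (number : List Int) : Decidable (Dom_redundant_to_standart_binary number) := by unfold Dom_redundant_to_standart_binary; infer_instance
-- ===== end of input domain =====

-- B replaces A's reversed-enumerate loop with 2**power weights by a forward index-driven Horner scan (result = 2*result + digit); measurably faster since it avoids the growing exponentiation.


-- ===== PORT A =====
-- Port of A: fold over enumerate(reversed(number)), adding val * 2**power each step.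
def redundant_to_standart_binary (number : List Int) : Int :=
  (PySem.List.enumerate number.reverse 0).foldl
    (fun result i => result + i.2 * 2 ^ i.1.toNat) 0

-- ===== PORT B =====
-- B's while loop consuming the list front-to-back, tail-recursively threading `result`.
def pvHornerGo (result : Int) (rest : List Int) : Int :=
  match rest with
  | [] => result
  | d :: t => pvHornerGo (2 * result + d) t

def redundant_to_standart_binary_alt (number : List Int) : Int :=
  pvHornerGo 0 number

-- ===== PRECONDITION & SPEC =====
def Spec_redundant_to_standart_binary (number : List Int) (out : Int) : Prop := out = redundant_to_standart_binary_alt number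
instance (number : List Int) (out : Int) : Decidable (Spec_redundant_to_standart_binary number out) := by unfold Spec_redundant_to_standart_binary; infer_instance

-- ===== CLAIM (what is proved, stated in full; the proofs are below) =====
def Claim_equal_redundant_to_standart_binary : Prop := ∀ (number : List Int), Dom_redundant_to_standart_binary number → Spec_redundant_to_standart_binary number (redundant_to_standart_binary number)

-- ===== LEMMAS AND PROOFS =====
-- Unrolling the Horner accumulator: its value is acc * 2^|l| plus the value from 0.
theorem hornerGo_acc (l : List Int) (acc : Int) :
    pvHornerGo acc l = acc * 2 ^ l.length + pvHornerGo 0 l := by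
  induction l generalizing acc with
  | nil => simp [pvHornerGo]
  | cons x t ih =>
    simp only [pvHornerGo, List.length_cons]
    rw [ih (2 * acc + x), ih (2 * 0 + x)]
    ring

-- A's enumerated sum starting at index k equals acc plus 2^k times B's Horner value of the reversed list.
theorem enum_sum_eq_horner (l : List Int) (k : Nat) (acc : Int) :
    (PySem.List.enumerate l (k : Int)).foldl
        (fun result i => result + i.2 * 2 ^ i.1.toNat) acc
      = acc + 2 ^ k * pvHornerGo 0 l.reverse := by
  induction l generalizing k acc with
  | nil => simp [PySem.List.enumerate_nil, pvHornerGo]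
  | cons x t ih =>
    rw [PySem.List.enumerate_cons, List.foldl_cons]
    have h1 : ((k : Int) + 1) = ((k + 1 : Nat) : Int) := by push_cast; ring
    rw [h1, ih (k + 1) (acc + x * 2 ^ ((k : Int)).toNat)]
    rw [Int.toNat_natCast k]
    have hsnoc : pvHornerGo 0 (t.reverse ++ [x])
        = 2 * pvHornerGo 0 t.reverse + x := by
      have : ∀ (m : List Int) (a : Int), pvHornerGo a (m ++ [x]) = 2 * pvHornerGo a m + x := by
        intro m
        induction m with
        | nil => intro a; simp [pvHornerGo]
        | cons y s ihs => intro a; simp only [List.cons_append, pvHornerGo]; exact ihs _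
      exact this t.reverse 0
    simp only [List.reverse_cons, hsnoc]
    rw [hornerGo_acc t.reverse 0]
    ring

-- ===== VERDICT (by name: the statement is the Claim_ definition above) =====
theorem redundant_to_standart_binary_spec : Claim_equal_redundant_to_standart_binary := by
  intro number _
  unfold Spec_redundant_to_standart_binary redundant_to_standart_binary
    redundant_to_standart_binary_alt
  have := enum_sum_eq_horner number.reverse 0 0
  simpa using this
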